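-- pv_equiv track=rewrite | github.com/bourbonut/detroit | detroit/format/format_trim.py | format_trim
-- ===== SOURCE A (Python) =====
-- def format_trim(s):
--     n = len(s)
--     i0 = -1
--     i1 = 0
--     for i in range(1, n):
--         c = s[i]
--         if c == ".":
--             i0 = i1 = i
--         elif c == "0":
--             if i0 == 0:
--                 i0 = i
--             i1 = i
--         else:
--             if not c.isdigit():
--                 break
--             if i0 > 0:
--                 i0 = 0
--     return s[:i0] + s[i1 + 1 :] if i0 > 0 else s
-- ===== SOURCE B (Python) =====
-- def format_trim(s):
--     n = len(s)
--     end = 1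
--     while end < n and (s[end].isdigit() or s[end] == "."):
--         end += 1
--     dot = s.rfind(".", 1, end)
--     if dot < 1:
--         return s
--     stripped = s[dot + 1 : end].rstrip("0")
--     cut = dot if not stripped else dot + 1 + len(stripped)
--     return s[:cut] + s[end:]
-- ===== Notes on version B (the rewrite author's own statement) =====
-- stated objective: idiomatic
-- what changed: Replaces A's single-pass i0/i1 state machine with an idiomatic decomposition: find the numeric boundary end, locate the governing decimal point via str.rfind restricted to positions 1..end, strip the fraction's trailing zeros with str.rstrip, and reassemble the string from slices.
import Mathlib
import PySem

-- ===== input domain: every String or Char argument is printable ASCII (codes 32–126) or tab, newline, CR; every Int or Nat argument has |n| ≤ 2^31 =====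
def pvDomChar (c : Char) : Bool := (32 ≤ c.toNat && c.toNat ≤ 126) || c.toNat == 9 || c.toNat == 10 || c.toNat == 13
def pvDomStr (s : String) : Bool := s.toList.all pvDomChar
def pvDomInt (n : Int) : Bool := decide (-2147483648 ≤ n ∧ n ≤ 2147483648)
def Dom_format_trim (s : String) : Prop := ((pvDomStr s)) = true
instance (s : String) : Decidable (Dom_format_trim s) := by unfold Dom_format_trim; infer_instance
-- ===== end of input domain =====

-- B replaces A's i0/i1 state machine by boundary-finding (first char that is neither digit nor dot),
-- rfind of the governing decimal point and stripping the fraction's trailing zeros; objective: idiomatic.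

-- ===== PORT A =====
-- the for-loop of A over s[1:], carrying (i, i0, i1); a non-digit char is the `break`
def pvALoop : List Char → Int → Int → Int → Int × Int
  | [], _, i0, i1 => (i0, i1)
  | c :: t, i, i0, i1 =>
    if c == '.' then pvALoop t (i + 1) i i
    else if c == '0' then pvALoop t (i + 1) (if i0 == 0 then i else i0) i
    else if PySem.Chars.isdigit c then pvALoop t (i + 1) (if i0 > 0 then 0 else i0) i1
    else (i0, i1)

def format_trim (s : String) : String :=
  let r := pvALoop (s.toList.drop 1) 1 (-1) 0
  let i0 := r.1
  let i1 := r.2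
  if i0 > 0 then
    String.ofList (PySem.List.slice s.toList none (some i0) ++
               PySem.List.slice s.toList (some (i1 + 1)) none)
  else s

-- ===== PORT B =====
def pvGood (c : Char) : Bool := PySem.Chars.isdigit c || c == '.'

-- the while-loop of B: advance `end` while the char is a digit or '.'
def pvScan : List Char → Nat → Nat
  | [], e => e
  | c :: t, e => if pvGood c then pvScan t (e + 1) else e

-- hand port of str.rstrip('0') (PySem has no rstrip-with-chars); exact on any char list
def pvRstrip0 (cs : List Char) : List Char := (cs.reverse.dropWhile (· == '0')).reverse

def format_trim_alt (s : String) : String :=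
  let e : Nat := pvScan (s.toList.drop 1) 1
  let dot : Int := PySem.Str.rfindFrom s "." 1 (some (e : Int))
  if dot < 1 then s
  else
    let stripped := pvRstrip0 (PySem.List.slice s.toList (some (dot + 1)) (some (e : Int)))
    let cut : Int := if stripped.isEmpty then dot else dot + 1 + (stripped.length : Int)
    String.ofList (PySem.List.slice s.toList none (some cut) ++
               PySem.List.slice s.toList (some (e : Int)) none)

-- ===== PRECONDITION & SPEC =====
def Spec_format_trim (s : String) (out : String) : Prop := out = format_trim_alt s
instance (s : String) (out : String) : Decidable (Spec_format_trim s out) := by unfold Spec_format_trim; infer_instance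

-- ===== CLAIM (what is proved, stated in full; the proofs are below) =====
def Claim_equal_format_trim : Prop := ∀ (s : String), Dom_format_trim s → Spec_format_trim s (format_trim s)

-- ===== LEMMAS AND PROOFS =====

-- index (from the left) of the LAST char satisfying p
def lastIdx? (p : Char → Bool) : List Char → Option Nat
  | [] => none
  | c :: t =>
    match lastIdx? p t with
    | some k => some (k + 1)
    | none => if p c then some 0 else none

-- length of the maximal trailing run of '0'
def zr : List Char → Nat
  | [] => 0
  | c :: t => if c == '0' && zr t == t.length then t.length + 1 else zr t

-- closed form of A's i0 evolution over a dot-free suffix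
def h0 (cs : List Char) (i i0 : Int) : Int :=
  if i0 < 0 then i0
  else if zr cs = cs.length then (if i0 = 0 then (if cs.length = 0 then 0 else i) else i0)
  else if zr cs = 0 then 0 else i + ((cs.length : Int) - (zr cs : Int))

def pvZD (c : Char) : Bool := c == '0' || c == '.'

-- closed form of A's loop on an all-good list
def F (cs : List Char) (i i0 i1 : Int) : Int × Int :=
  ((match lastIdx? (· == '.') cs with
    | some k => h0 (cs.drop (k + 1)) (i + (k : Int) + 1) (i + (k : Int))
    | none => h0 cs i i0),
   (match lastIdx? pvZD cs with
    | some m => i + (m : Int)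
    | none => i1))

lemma lastIdx?_cons (p : Char → Bool) (c : Char) (t : List Char) :
    lastIdx? p (c :: t) = match lastIdx? p t with
      | some k => some (k + 1)
      | none => if p c then some 0 else none := rfl

lemma zr_cons (c : Char) (t : List Char) :
    zr (c :: t) = if c == '0' && zr t == t.length then t.length + 1 else zr t := rfl

lemma zr_le (cs : List Char) : zr cs ≤ cs.length := by
  induction cs with
  | nil => simp [zr]
  | cons c t ih => rw [zr_cons]; split <;> simp <;> omega

lemma h0_nil (i i0 : Int) : h0 [] i i0 = i0 := by
  simp only [h0, zr, List.length_nil]; split_ifs <;> omega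

lemma h0_zero (t : List Char) (i i0 : Int) (hi : 1 ≤ i) :
    h0 ('0' :: t) i i0 = h0 t (i + 1) (if i0 = 0 then i else i0) := by
  have hz := zr_le t
  unfold h0
  rw [zr_cons]
  by_cases hall : zr t = t.length <;> simp [hall] <;> split_ifs <;> push_cast <;> omega

lemma h0_nz (c : Char) (hc : ¬ (c == '0')) (t : List Char) (i i0 : Int) (hi : 1 ≤ i) :
    h0 (c :: t) i i0 = h0 t (i + 1) (if i0 > 0 then 0 else i0) := by
  have hz := zr_le t
  unfold h0
  rw [zr_cons]
  by_cases hall : zr t = t.length <;> simp [hall, hc] <;> split_ifs <;> push_cast <;> omega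

lemma zero_isdigit : PySem.Chars.isdigit '0' = true := by decide

lemma loop_stop (cs : List Char) (i i0 i1 : Int) :
    pvALoop cs i i0 i1 = pvALoop (cs.takeWhile pvGood) i i0 i1 := by
  induction cs generalizing i i0 i1 with
  | nil => simp
  | cons c t ih =>
    by_cases hg : pvGood c = true
    · rw [List.takeWhile_cons_of_pos hg]
      by_cases hd : c == '.'
      · simp only [pvALoop, hd, if_pos]; exact ih _ _ _
      · by_cases h0 : c == '0'
        · simp only [pvALoop, hd, h0, if_neg, if_pos]; simp only [Bool.not_eq_true] at hd
          simp [pvALoop, hd, h0]; exact ih _ _ _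
        · have hdig : PySem.Chars.isdigit c = true := by
            simp only [pvGood, Bool.or_eq_true] at hg
            rcases hg with h | h
            · exact h
            · exact absurd h hd
          simp [pvALoop, hd, h0, hdig]; exact ih _ _ _
    · rw [List.takeWhile_cons_of_neg hg]
      simp only [pvGood, Bool.or_eq_true, not_or, Bool.not_eq_true] at hg
      obtain ⟨hdig, hd⟩ := hg
      have h0 : (c == '0') = false := by
        by_cases h : c = '0'
        · subst h; simp [zero_isdigit] at hdig
        · simp [h]
      simp [pvALoop, hd, h0, hdig]

lemma loop_closed (cs : List Char) (h : ∀ c ∈ cs, pvGood c = true) (i i0 i1 : Int)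
    (hi : 1 ≤ i) : pvALoop cs i i0 i1 = F cs i i0 i1 := by
  induction cs generalizing i i0 i1 with
  | nil => simp [pvALoop, F, lastIdx?, h0_nil]
  | cons c t ih =>
    have hgc : pvGood c = true := h c List.mem_cons_self
    have ht : ∀ c ∈ t, pvGood c = true := fun x hx => h x (List.mem_cons_of_mem _ hx)
    by_cases hd : c = '.'
    · subst hd
      simp only [pvALoop, if_pos (by rfl : ('.' == '.') = true)]
      rw [ih ht _ _ _ (by omega)]
      unfold F
      rw [lastIdx?_cons, lastIdx?_cons]
      refine Prod.ext ?_ ?_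
      case _ =>
        cases hk : lastIdx? (· == '.') t with
        | some k =>
          simp only [hk, List.drop_succ_cons]
          push_cast; ring_nf
        | none =>
          simp only [hk, if_pos (by rfl : (('.' : Char) == '.') = true)]
          norm_num
      case _ =>
        cases hm : lastIdx? pvZD t with
        | some m => simp only [hm]; push_cast; ring
        | none => simp only [hm, pvZD]; norm_num
    · by_cases h00 : c = '0'
      · subst h00
        simp only [pvALoop, if_neg (by decide : ¬(('0' : Char) == '.') = true),
          if_pos (by rfl : ('0' == '0') = true)]
        rw [ih ht _ _ _ (by omega)]
        unfold F
        rw [lastIdx?_cons, lastIdx?_cons]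
        refine Prod.ext ?_ ?_
        case _ =>
          cases hk : lastIdx? (· == '.') t with
          | some k =>
            simp only [hk, List.drop_succ_cons]
            push_cast; ring_nf
          | none =>
            simp only [hk, if_neg (by decide : ¬(('0' : Char) == '.') = true)]
            have := h0_zero t i i0 hi
            simpa [beq_iff_eq] using this.symm
        case _ =>
          cases hm : lastIdx? pvZD t with
          | some m => simp only [hm]; push_cast; ring
          | none => simp only [hm, pvZD]; norm_num
      · have hdig : PySem.Chars.isdigit c = true := by
          simp only [pvGood, Bool.or_eq_true] at hgc
          rcases hgc with hh | hh
          · exact hh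
          · exact absurd (by simpa using hh) hd
        have hdb : (c == '.') = false := by simp [hd]
        have h0b : (c == '0') = false := by simp [h00]
        rw [show pvALoop (c :: t) i i0 i1 = pvALoop t (i + 1) (if i0 > 0 then 0 else i0) i1 from by
          simp only [pvALoop, hdb, h0b, hdig, Bool.false_eq_true, if_false, if_true]]
        rw [ih ht _ _ _ (by omega)]
        unfold F
        rw [lastIdx?_cons, lastIdx?_cons]
        refine Prod.ext ?_ ?_
        case _ =>
          cases hk : lastIdx? (· == '.') t with
          | some k =>
            simp only [hk, List.drop_succ_cons]
            push_cast; ring_nf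
          | none =>
            simp only [hk, hdb, Bool.false_eq_true, if_false]
            have := h0_nz c (by simp [h00]) t i i0 hi
            simpa [beq_iff_eq] using this.symm
        case _ =>
          cases hm : lastIdx? pvZD t with
          | some m => simp only [hm]; push_cast; ring
          | none => simp only [hm, pvZD, hdb, h0b]; norm_num

lemma pvScan_eq (cs : List Char) (e : Nat) :
    pvScan cs e = e + (cs.takeWhile pvGood).length := by
  induction cs generalizing e with
  | nil => simp [pvScan]
  | cons c t ih =>
    by_cases hg : pvGood c = true
    · rw [List.takeWhile_cons_of_pos hg]
      simp only [pvScan, hg, if_true, ih, List.length_cons]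
      omega
    · rw [List.takeWhile_cons_of_neg hg]
      simp [pvScan, hg]

lemma zr_rev (cs : List Char) :
    zr cs = (cs.reverse.takeWhile (· == '0')).length := by
  induction cs with
  | nil => simp [zr]
  | cons c t ih =>
    rw [zr_cons, List.reverse_cons, List.takeWhile_append]
    by_cases hall : (List.takeWhile (· == '0') t.reverse).length = t.reverse.length
    · rw [if_pos hall]
      have hzt : zr t = t.length := by
        rw [ih]; simpa using hall
      by_cases hc : c = '0'
      · subst hc
        rw [if_pos (by simp [hzt])]
        simp
      · rw [if_neg (by simp [hc])]
        simp [hc, hzt]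
    · rw [if_neg hall]
      have hzt : ¬ zr t = t.length := by
        rw [ih]; simpa using hall
      rw [if_neg (by simp [hzt])]
      exact ih

lemma rstrip_len (cs : List Char) : (pvRstrip0 cs).length = cs.length - zr cs := by
  have h := congrArg List.length (List.takeWhile_append_dropWhile
    (p := (· == '0')) (l := cs.reverse))
  simp only [List.length_append, List.length_reverse] at h
  simp only [pvRstrip0, List.length_reverse]
  rw [zr_rev]
  omega

lemma rstrip_nil_iff (cs : List Char) : pvRstrip0 cs = [] ↔ zr cs = cs.length := by
  have hle := zr_le cs
  have hlen := rstrip_len cs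
  constructor
  · intro h
    rw [h] at hlen
    simp at hlen
    omega
  · intro h
    rw [h] at hlen
    simp only [Nat.sub_self] at hlen
    exact List.eq_nil_of_length_eq_zero hlen

lemma lastIdx?_lt (p : Char → Bool) (cs : List Char) (k : Nat)
    (h : lastIdx? p cs = some k) : k < cs.length := by
  induction cs generalizing k with
  | nil => simp [lastIdx?] at h
  | cons c t ih =>
    rw [lastIdx?_cons] at h
    cases ht : lastIdx? p t with
    | some k' =>
      rw [ht] at h
      simp at h
      have := ih k' ht
      simp
      omega
    | none =>
      rw [ht] at h
      by_cases hp : p c = true <;> simp [hp] at h <;> simp <;> omega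

lemma lastIdx?_append (p : Char → Bool) (xs : List Char) (x : Char) :
    lastIdx? p (xs ++ [x]) = if p x then some xs.length else lastIdx? p xs := by
  induction xs with
  | nil => simp [lastIdx?]
  | cons c t ih =>
    rw [List.cons_append, lastIdx?_cons, ih, lastIdx?_cons]
    by_cases hp : p x = true
    · simp [hp]
    · simp only [hp, Bool.false_eq_true, if_false]

lemma zr_pos_last (cs : List Char) (h : 0 < zr cs) :
    lastIdx? (· == '0') cs = some (cs.length - 1) := by
  induction cs with
  | nil => simp [zr] at h
  | cons c t ih =>
    rw [zr_cons] at h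
    by_cases hz : 0 < zr t
    · rw [lastIdx?_cons, ih hz]
      have := lastIdx?_lt (· == '0') t _ (ih hz)
      simp only [List.length_cons]
      congr 1
      omega
    · have h1 : (c == '0' && (zr t == t.length)) = true := by
        by_contra hc
        simp only [Bool.not_eq_true] at hc
        rw [hc] at h
        simp only [Bool.false_eq_true, if_false] at h
        exact hz h
      simp only [Bool.and_eq_true, beq_iff_eq] at h1
      obtain ⟨hc0, htl⟩ := h1
      have ht0 : t = [] := by
        rcases t with _ | ⟨d, t'⟩
        · rfl
        · exfalso
          apply hz
          rw [htl]
          simp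
      subst ht0
      subst hc0
      simp [lastIdx?]

lemma no_dot_zd (cs : List Char) (h : lastIdx? (· == '.') cs = none) :
    lastIdx? pvZD cs = lastIdx? (· == '0') cs := by
  induction cs with
  | nil => simp [lastIdx?]
  | cons c t ih =>
    rw [lastIdx?_cons] at h
    cases ht : lastIdx? (· == '.') t with
    | some k => rw [ht] at h; simp at h
    | none =>
      rw [ht] at h
      have hc : (c == '.') = false := by
        by_contra hc
        simp only [Bool.not_eq_false] at hc
        rw [if_pos hc] at h
        simp at h
      rw [lastIdx?_cons, lastIdx?_cons, ih ht]
      cases h0 : lastIdx? (· == '0') t with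
      | some m => rfl
      | none => simp [pvZD, hc]

lemma zd_dot (cs : List Char) (k : Nat) (h : lastIdx? (· == '.') cs = some k) :
    lastIdx? pvZD cs = match lastIdx? (· == '0') (cs.drop (k + 1)) with
      | some m => some (k + 1 + m)
      | none => some k := by
  induction cs generalizing k with
  | nil => simp [lastIdx?] at h
  | cons c t ih =>
    rw [lastIdx?_cons] at h
    cases ht : lastIdx? (· == '.') t with
    | some k' =>
      rw [ht] at h
      simp only [Option.some.injEq] at h
      subst h
      rw [lastIdx?_cons, ih k' ht, List.drop_succ_cons]
      cases h0 : lastIdx? (· == '0') (t.drop (k' + 1)) with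
      | some m => simp; omega
      | none => simp
    | none =>
      rw [ht] at h
      have hc : (c == '.') = true := by
        by_contra hc
        simp only [Bool.not_eq_true] at hc
        rw [hc] at h
        simp at h
      rw [if_pos hc] at h
      simp only [Option.some.injEq] at h
      subst h
      rw [lastIdx?_cons, no_dot_zd t ht]
      simp only [Nat.zero_add, List.drop_succ_cons, List.drop_zero]
      cases h0 : lastIdx? (· == '0') t with
      | some m => simp [h0]; omega
      | none => simp [h0, pvZD, hc]

lemma isPrefixOf_dot (l : List Char) :
    List.isPrefixOf ['.'] l = (match l with | [] => false | c :: _ => c == '.') := by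
  cases l with
  | nil => simp [List.isPrefixOf]
  | cons c t => simp [List.isPrefixOf, eq_comm]

lemma go_last (cs : List Char) (j : Nat) :
    PySem.Chars.rfind.go cs ['.'] j =
      (match lastIdx? (· == '.') (cs.take (j + 1)) with
       | some k => (k : Int)
       | none => -1) := by
  induction j with
  | zero =>
    rw [PySem.Chars.rfind.go]
    cases cs with
    | nil => simp [lastIdx?, List.isPrefixOf]
    | cons c t =>
      rw [List.take_succ_cons, List.take_zero]
      rw [isPrefixOf_dot]
      simp only [lastIdx?_cons, lastIdx?]
      by_cases hc : (c == '.') = true <;> simp [hc]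
  | succ j ih =>
    rw [PySem.Chars.rfind.go, ih]
    by_cases hlt : j + 1 < cs.length
    · rw [List.drop_eq_getElem_cons hlt, isPrefixOf_dot]
      have htake : cs.take (j + 1 + 1) = cs.take (j + 1) ++ [cs[j + 1]] := by
        rw [List.take_add_one]
        congr 1
        simp [List.getElem?_eq_getElem hlt]
      rw [htake, lastIdx?_append]
      have hlen : (cs.take (j + 1)).length = j + 1 := by simp; omega
      by_cases hc : (cs[j + 1] == '.') = true
      · simp [hc, hlen]
      · simp only [hc, Bool.false_eq_true, if_false]
    · have h1 : cs.drop (j + 1) = [] := by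
        rw [List.drop_eq_nil_iff]; omega
      have h2 : cs.take (j + 1 + 1) = cs.take (j + 1) := by
        rw [List.take_of_length_le (by omega), List.take_of_length_le (by omega)]
      rw [h1, h2, isPrefixOf_dot]
      simp

lemma rfind_dot (cs : List Char) :
    PySem.Chars.rfind cs ['.'] =
      (match lastIdx? (· == '.') cs with
       | some k => (k : Int)
       | none => -1) := by
  rw [PySem.Chars.rfind, go_last, List.take_of_length_le (by omega)]

lemma rfindFrom_dot (cs : List Char) (e : Nat) (h1 : 1 ≤ e) (h2 : e ≤ cs.length) :
    PySem.Chars.rfindFrom cs ['.'] 1 (some (e : Int)) =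
      (match lastIdx? (· == '.') ((cs.take e).drop 1) with
       | some k => ((1 + k : Nat) : Int)
       | none => -1) := by
  rw [PySem.Chars.rfindFrom]
  have c1 : ¬ ((cs.length : Int) < (e : Int)) := by
    push_cast; omega
  have c2 : ¬ ((e : Int) < 0) := by omega
  have c3 : ¬ ((1 : Int) < 0) := by norm_num
  have c4 : ¬ ((if (cs.length : Int) < (e : Int) then (cs.length : Int)
      else if (e : Int) < 0 then (if (e : Int) + (cs.length : Int) < 0 then 0
        else (e : Int) + (cs.length : Int)) else (e : Int)) <
      (if (1 : Int) < 0 then (if (1 : Int) + (cs.length : Int) < 0 then 0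
        else (1 : Int) + (cs.length : Int)) else 1)) := by
    rw [if_neg c1, if_neg c2, if_neg c3]
    omega
  have c5 : ¬ ((e : Int) < 1) := by omega
  simp only [if_neg c4, if_neg c1, if_neg c2, if_neg c3, if_neg c5]
  rw [show ((1 : Int)).toNat = 1 from rfl, Int.toNat_natCast, rfind_dot]
  cases h : lastIdx? (· == '.') ((cs.take e).drop 1) with
  | some k => simp
  | none => simp

lemma main_eq (s : String) : format_trim s = format_trim_alt s := by
  simp only [format_trim, format_trim_alt]
  cases hcs : s.toList with
  | nil =>
    simp only [PySem.Str.rfindFrom, hcs, List.drop_nil]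
    rw [show pvScan [] 1 = 1 from rfl]
    rw [show pvALoop [] 1 (-1) 0 = (-1, 0) from rfl]
    rw [show PySem.Chars.rfindFrom [] ".".toList 1 (some ((1 : Nat) : Int)) = -1 from by decide]
    norm_num
  | cons c0 tl =>
    have hgl : (tl.takeWhile pvGood).length ≤ tl.length :=
      (List.takeWhile_prefix pvGood).length_le
    have htake : tl.take (tl.takeWhile pvGood).length = tl.takeWhile pvGood :=
      ((List.prefix_iff_eq_take).1 (List.takeWhile_prefix pvGood)).symm
    have hA : pvALoop ((c0 :: tl).drop 1) 1 (-1) 0 = F (tl.takeWhile pvGood) 1 (-1) 0 := by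
      rw [List.drop_one, List.tail_cons, loop_stop]
      exact loop_closed _ (fun c hc => List.mem_takeWhile_imp hc) 1 (-1) 0 (by norm_num)
    have hscan : pvScan ((c0 :: tl).drop 1) 1 = 1 + (tl.takeWhile pvGood).length := by
      rw [List.drop_one, List.tail_cons, pvScan_eq]
    have hsl : ((c0 :: tl).take (1 + (tl.takeWhile pvGood).length)).drop 1
        = tl.takeWhile pvGood := by
      rw [Nat.add_comm, List.take_succ_cons, List.drop_one, List.tail_cons, htake]
    have hlen : 1 + (tl.takeWhile pvGood).length ≤ (c0 :: tl).length := by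
      simp; omega
    have hdot : PySem.Str.rfindFrom s "." 1
        (some ((1 + (tl.takeWhile pvGood).length : Nat) : Int)) =
        (match lastIdx? (· == '.') (tl.takeWhile pvGood) with
         | some k => ((1 + k : Nat) : Int)
         | none => -1) := by
      rw [PySem.Str.rfindFrom, show (".".toList) = ['.'] from rfl, hcs,
        rfindFrom_dot (c0 :: tl) _ (by omega) hlen, hsl]
    rw [hA]
    rw [hscan]
    push_cast
    rw [show ((1 : Int) + ((tl.takeWhile pvGood).length : Int)) =
      ((1 + (tl.takeWhile pvGood).length : Nat) : Int) from by push_cast; ring]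
    rw [hdot]
    cases hk : lastIdx? (· == '.') (tl.takeWhile pvGood) with
    | none =>
      have h1 : (F (tl.takeWhile pvGood) 1 (-1) 0).1 = -1 := by
        unfold F
        rw [hk]
        simp only []
        unfold h0
        rw [if_pos (by norm_num)]
      rw [h1]
      norm_num
    | some k =>
      simp only []
      rw [if_neg (show ¬ (((1 + k : Nat) : Int) < 1) by push_cast; omega)]
      have hklt : k < (List.takeWhile pvGood tl).length := lastIdx?_lt _ _ _ hk
      have hfl : ((List.takeWhile pvGood tl).drop (k + 1)).length
          = (List.takeWhile pvGood tl).length - (k + 1) := by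
        rw [List.length_drop]
      have hF1 : (F (List.takeWhile pvGood tl) 1 (-1) 0).1
          = h0 ((List.takeWhile pvGood tl).drop (k + 1)) (1 + (k : Int) + 1) (1 + (k : Int)) := by
        unfold F
        rw [hk]
      have hfslice : PySem.List.slice (c0 :: tl) (some (((1 + k : Nat) : Int) + 1))
          (some ((1 + (List.takeWhile pvGood tl).length : Nat) : Int))
          = (List.takeWhile pvGood tl).drop (k + 1) := by
        rw [show (((1 + k : Nat) : Int) + 1) = ((k + 2 : Nat) : Int) from by push_cast; ring]
        rw [PySem.List.slice_natCast]
        rw [show ((c0 :: tl).drop (k + 2)) = tl.drop (k + 1) from by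
          rw [show k + 2 = (k + 1) + 1 from rfl, List.drop_succ_cons]]
        rw [show 1 + (List.takeWhile pvGood tl).length - (k + 2)
          = (List.takeWhile pvGood tl).length - (k + 1) from by omega]
        rw [← htake, List.drop_take, htake]
      rw [hF1, hfslice]
      have hzd := zd_dot (List.takeWhile pvGood tl) k hk
      by_cases hz : zr ((List.takeWhile pvGood tl).drop (k + 1))
          = ((List.takeWhile pvGood tl).drop (k + 1)).length
      · -- fraction is all zeros (possibly empty): both cut at the dot
        have hstr : pvRstrip0 ((List.takeWhile pvGood tl).drop (k + 1)) = [] :=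
          (rstrip_nil_iff _).2 hz
        rw [hstr]
        have hi0 : h0 ((List.takeWhile pvGood tl).drop (k + 1)) (1 + (k : Int) + 1) (1 + (k : Int))
            = 1 + (k : Int) := by
          unfold h0
          rw [if_neg (by omega), if_pos hz, if_neg (by omega)]
        rw [hi0, if_pos (by omega : (1 : Int) + (k : Int) > 0)]
        rw [if_pos (by simp : ([] : List Char).isEmpty = true)]
        by_cases hfe : ((List.takeWhile pvGood tl).drop (k + 1)).length = 0
        · have hnone : lastIdx? (· == '0') ((List.takeWhile pvGood tl).drop (k + 1)) = none := by
            rw [List.eq_nil_of_length_eq_zero hfe]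
            rfl
          rw [hnone] at hzd
          have hF2 : (F (List.takeWhile pvGood tl) 1 (-1) 0).2 = 1 + (k : Int) := by
            unfold F
            rw [hzd]
          rw [hF2]
          have e1 : (1 : Int) + (k : Int) = ((1 + k : Nat) : Int) := by push_cast; ring
          have e2 : ((1 + k : Nat) : Int) + 1
              = ((1 + (List.takeWhile pvGood tl).length : Nat) : Int) := by omega
          rw [e1, e2]
        · have hsome : lastIdx? (· == '0') ((List.takeWhile pvGood tl).drop (k + 1))
              = some (((List.takeWhile pvGood tl).drop (k + 1)).length - 1) :=
            zr_pos_last _ (by omega)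
          rw [hsome] at hzd
          have hF2 : (F (List.takeWhile pvGood tl) 1 (-1) 0).2
              = 1 + ((k + 1 + (((List.takeWhile pvGood tl).drop (k + 1)).length - 1) : Nat) : Int) := by
            unfold F
            rw [hzd]
          rw [hF2]
          have e1 : (1 : Int) + (k : Int) = ((1 + k : Nat) : Int) := by push_cast; ring
          have e2 : (1 : Int) + ((k + 1 + (((List.takeWhile pvGood tl).drop (k + 1)).length - 1) : Nat) : Int) + 1
              = ((1 + (List.takeWhile pvGood tl).length : Nat) : Int) := by omega
          rw [e1, e2]
      · have hzlt : zr ((List.takeWhile pvGood tl).drop (k + 1))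
            < ((List.takeWhile pvGood tl).drop (k + 1)).length := by
          have := zr_le ((List.takeWhile pvGood tl).drop (k + 1))
          omega
        have hnem : ((pvRstrip0 ((List.takeWhile pvGood tl).drop (k + 1))).isEmpty = true) = False := by
          simp only [List.isEmpty_iff, eq_iff_iff, iff_false]
          intro hcon
          exact hz ((rstrip_nil_iff _).1 hcon)
        by_cases hz0 : zr ((List.takeWhile pvGood tl).drop (k + 1)) = 0
        · -- no trailing zeros after the dot: A keeps s, B reassembles s
          have hi0 : h0 ((List.takeWhile pvGood tl).drop (k + 1)) (1 + (k : Int) + 1) (1 + (k : Int))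
              = 0 := by
            unfold h0
            rw [if_neg (by omega), if_neg hz, if_pos hz0]
          rw [hi0, if_neg (by omega : ¬ ((0 : Int) > 0))]
          rw [if_neg (show ¬ ((pvRstrip0 ((List.takeWhile pvGood tl).drop (k + 1))).isEmpty = true)
            from by rw [hnem]; exact id)]
          rw [rstrip_len]
          have hcut : ((1 + k : Nat) : Int) + 1 +
              ((((List.takeWhile pvGood tl).drop (k + 1)).length
                - zr ((List.takeWhile pvGood tl).drop (k + 1)) : Nat) : Int)
              = ((1 + (List.takeWhile pvGood tl).length : Nat) : Int) := by omega
          rw [hcut, PySem.List.slice_to_natCast, PySem.List.slice_from_natCast,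
            List.take_append_drop, ← hcs, String.ofList_toList]
        · -- a proper trailing zero run: both cut right after the stripped fraction
          have hi0 : h0 ((List.takeWhile pvGood tl).drop (k + 1)) (1 + (k : Int) + 1) (1 + (k : Int))
              = 1 + (k : Int) + 1 + ((((List.takeWhile pvGood tl).drop (k + 1)).length : Int)
                - (zr ((List.takeWhile pvGood tl).drop (k + 1)) : Int)) := by
            unfold h0
            rw [if_neg (by omega), if_neg hz, if_neg hz0]
          rw [hi0, if_pos (by omega)]
          rw [if_neg (show ¬ ((pvRstrip0 ((List.takeWhile pvGood tl).drop (k + 1))).isEmpty = true)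
            from by rw [hnem]; exact id)]
          rw [rstrip_len]
          have hsome : lastIdx? (· == '0') ((List.takeWhile pvGood tl).drop (k + 1))
              = some (((List.takeWhile pvGood tl).drop (k + 1)).length - 1) :=
            zr_pos_last _ (by omega)
          rw [hsome] at hzd
          have hF2 : (F (List.takeWhile pvGood tl) 1 (-1) 0).2
              = 1 + ((k + 1 + (((List.takeWhile pvGood tl).drop (k + 1)).length - 1) : Nat) : Int) := by
            unfold F
            rw [hzd]
          rw [hF2]
          have e1 : (1 : Int) + (k : Int) + 1 + ((((List.takeWhile pvGood tl).drop (k + 1)).length : Int)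
                - (zr ((List.takeWhile pvGood tl).drop (k + 1)) : Int))
              = ((1 + k : Nat) : Int) + 1 +
                ((((List.takeWhile pvGood tl).drop (k + 1)).length
                  - zr ((List.takeWhile pvGood tl).drop (k + 1)) : Nat) : Int) := by omega
          have e2 : (1 : Int) + ((k + 1 + (((List.takeWhile pvGood tl).drop (k + 1)).length - 1) : Nat) : Int) + 1
              = ((1 + (List.takeWhile pvGood tl).length : Nat) : Int) := by omega
          rw [e1, e2]

-- ===== VERDICT (by name: the statement is the Claim_ definition above) =====
theorem format_trim_spec : Claim_equal_format_trim := by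
  unfold Claim_equal_format_trim Spec_format_trim
  intro s _
  exact main_eq s
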